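-- pv_equiv track=rewrite | github.com/UCLA-VAST/Prometheus | test4.py | calculate_latency
-- ===== SOURCE A (Python) =====
-- def calculate_latency(node, dependencies, latency, shifts, memo):
--     if node in memo:
--         return memo[node]
--
--     if not dependencies[node]:  # If there are no dependencies
--         memo[node] = latency[node]
--         return latency[node]
--
--     dependency_latencies = []
--     for dep in dependencies[node]:
--         dep_latency = calculate_latency(dep, dependencies, latency, shifts, memo)
--         shift = shifts.get((dep, node), "0")
--         dependency_latencies.append(f"{shift} + {latency[node]}, {dep_latency}")
--
--     if dependency_latencies:
--         max_dependency_latency = f"max({', '.join(dependency_latencies)})"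
--     else:
--         max_dependency_latency = latency[node]
--
--     total_latency = max_dependency_latency
--     memo[node] = total_latency
--     return total_latency
-- ===== SOURCE B (Python) =====
-- def calculate_latency(node, dependencies, latency, shifts, memo):
--     # Bottom-up rounds of dynamic programming instead of A's recursive DFS:
--     # repeatedly sweep the dependency dict, filling memo for every key whose
--     # dependencies are all memoised already; len(dependencies) sweeps reach
--     # the fixpoint on any acyclic graph, whatever order the dict lists keys in.
--     # (Return value matches A; B may fill memo entries A's DFS never visits.)
--     if node in memo:
--         return memo[node]
--     for _ in range(len(dependencies)):
--         if node in memo: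
--             break
--         for k, ds in dependencies.items():
--             if k in memo or k not in latency or not all(d in memo for d in ds):
--                 continue
--             if not ds:
--                 memo[k] = latency[k]
--             else:
--                 memo[k] = "max(" + ", ".join(
--                     f"{shifts.get((d, k), '0')} + {latency[k]}, {memo[d]}"
--                     for d in ds) + ")"
--     return memo[node]
-- ===== Notes on version B (the rewrite author's own statement) =====
-- stated objective: alternative
-- what changed: A's top-down memoised DFS recursion is replaced by an iterative bottom-up fixpoint computation: repeated sweeps over the dependency dict memoise every key whose dependencies are all memoised already, until the queried node's value appears; return value matches A on any acyclic input in any dict order (B fills extra memo entries).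
import Mathlib
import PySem

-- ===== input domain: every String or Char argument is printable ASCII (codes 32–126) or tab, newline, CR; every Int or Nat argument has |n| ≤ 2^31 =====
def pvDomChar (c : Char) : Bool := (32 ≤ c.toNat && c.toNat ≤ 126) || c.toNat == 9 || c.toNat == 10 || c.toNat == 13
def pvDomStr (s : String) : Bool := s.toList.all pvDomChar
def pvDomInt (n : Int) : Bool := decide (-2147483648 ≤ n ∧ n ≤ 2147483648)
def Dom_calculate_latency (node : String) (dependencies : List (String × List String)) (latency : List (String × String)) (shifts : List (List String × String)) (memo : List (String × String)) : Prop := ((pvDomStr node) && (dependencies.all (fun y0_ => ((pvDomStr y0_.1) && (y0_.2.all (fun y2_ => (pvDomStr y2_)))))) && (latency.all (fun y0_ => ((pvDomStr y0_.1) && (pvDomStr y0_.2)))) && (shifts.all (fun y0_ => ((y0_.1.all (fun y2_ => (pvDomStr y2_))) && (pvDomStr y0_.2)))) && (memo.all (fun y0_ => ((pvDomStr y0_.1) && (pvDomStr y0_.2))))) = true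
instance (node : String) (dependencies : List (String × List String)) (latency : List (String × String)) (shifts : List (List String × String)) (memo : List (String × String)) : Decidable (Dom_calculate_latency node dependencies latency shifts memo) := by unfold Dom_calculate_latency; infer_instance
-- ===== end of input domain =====

-- B replaces A's top-down memoised DFS recursion by an iterative bottom-up fixpoint: repeated
-- sweeps over the dependency dict memoise every key whose dependencies are already memoised.
-- Equivalence is about the RETURN value only (both Pythons mutate `memo` in place; B may fill
-- memo entries A's DFS never visits).

-- ===== PORT A =====
-- A's recursion is fuelled (fuel `dependencies.length + 1` suffices on Pre_); Python's KeyError /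
-- non-termination on cycles (outside Pre_) are rendered as the default "" / fuel exhaustion.
def calcLatA (dep : PySem.Dict String (List String)) (lat : PySem.Dict String String)
    (sh : PySem.Dict (List String) String) :
    Nat → String → PySem.Dict String String → String × PySem.Dict String String
  | 0, _, m => ("", m)
  | f + 1, node, m =>
    match m.get? node with
    | some v => (v, m)
    | none =>
      match dep.get? node with
      | none => ("", m)
      | some ds =>
        if ds.isEmpty then
          let lv := (lat.get? node).getD ""
          (lv, m.insert node lv)
        else
          let st := ds.foldl
            (fun (st : List String × PySem.Dict String String) d =>
              let p := calcLatA dep lat sh f d st.2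
              (st.1 ++ [sh.getD [d, node] "0" ++ " + " ++ (lat.get? node).getD "" ++ ", " ++ p.1],
               p.2))
            ([], m)
          let r := if st.1.isEmpty then (lat.get? node).getD ""
                   else "max(" ++ PySem.Str.join ", " st.1 ++ ")"
          (r, st.2.insert node r)

def calculate_latency (node : String) (dependencies : List (String × List String)) (latency : List (String × String)) (shifts : List (List String × String)) (memo : List (String × String)) : String :=
  (calcLatA (PySem.Dict.mk dependencies) (PySem.Dict.mk latency) (PySem.Dict.mk shifts)
    (dependencies.length + 1) node (PySem.Dict.mk memo)).1

-- ===== PORT B =====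
-- string B stores for key k with dependency list ds and latency entry lv
def valB (sh : PySem.Dict (List String) String) (k : String) (ds : List String) (lv : String)
    (m : PySem.Dict String String) : String :=
  if ds.isEmpty then lv
  else "max(" ++ PySem.Str.join ", " (ds.map (fun d =>
    sh.getD [d, k] "0" ++ " + " ++ lv ++ ", " ++ (m.get? d).getD "")) ++ ")"

-- body of B's inner loop: `if k in memo or k not in latency or not all(d in memo for d in ds): continue; memo[k] = …`
def stepB (lat : PySem.Dict String String) (sh : PySem.Dict (List String) String)
    (m : PySem.Dict String String) (e : String × List String) : PySem.Dict String String :=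
  match m.get? e.1, lat.get? e.1 with
  | none, some lv =>
    if e.2.all (fun d => (m.get? d).isSome) then m.insert e.1 (valB sh e.1 e.2 lv m) else m
  | _, _ => m

-- `for _ in range(len(dependencies)): if node in memo: break; <one sweep over dependencies.items()>`
def roundsB (lat : PySem.Dict String String) (sh : PySem.Dict (List String) String)
    (deps : List (String × List String)) (node : String) :
    Nat → PySem.Dict String String → PySem.Dict String String
  | 0, m => m
  | i + 1, m =>
    if (m.get? node).isSome then m
    else roundsB lat sh deps node i (deps.foldl (stepB lat sh) m)

def calculate_latency_alt (node : String) (dependencies : List (String × List String)) (latency : List (String × String)) (shifts : List (List String × String)) (memo : List (String × String)) : String :=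
  let m0 := PySem.Dict.mk memo
  match m0.get? node with
  | some v => v
  | none =>
    ((roundsB (PySem.Dict.mk latency) (PySem.Dict.mk shifts) dependencies node
        dependencies.length m0).get? node).getD ""

-- ===== PRECONDITION & SPEC =====
-- derivability closure: resolvB … n k ↔ k's value is obtainable within recursion depth n
-- (k already memoised, or k has a dependency entry, a latency entry, and derivable dependencies)
def resolvB (dep : PySem.Dict String (List String)) (lat m0 : PySem.Dict String String) :
    Nat → String → Bool
  | 0, k => (m0.get? k).isSome
  | n + 1, k =>
    resolvB dep lat m0 n k ||
      (match dep.get? k, lat.get? k with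
       | some ds, some _ => ds.all (fun d => resolvB dep lat m0 n d)
       | _, _ => false)

-- Pre_ excludes (i) the inputs where Python A raises — KeyError on a missing dependencies/latency
-- key, RecursionError on a cyclic graph — i.e. it requires the queried node's value to be
-- derivable within depth len(dependencies), and (ii) association lists with duplicate dependency
-- keys, which represent no Python dict (Python collapses duplicates before the call is made).
def Pre_calculate_latency (node : String) (dependencies : List (String × List String)) (latency : List (String × String)) (shifts : List (List String × String)) (memo : List (String × String)) : Prop :=
  (dependencies.map Prod.fst).Nodup ∧
    resolvB (PySem.Dict.mk dependencies) (PySem.Dict.mk latency) (PySem.Dict.mk memo)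
      dependencies.length node = true
instance (node : String) (dependencies : List (String × List String)) (latency : List (String × String)) (shifts : List (List String × String)) (memo : List (String × String)) : Decidable (Pre_calculate_latency node dependencies latency shifts memo) := by unfold Pre_calculate_latency; infer_instance

def pvWitness_calculate_latency : String × (List (String × List String)) × (List (String × String)) × (List (List String × String)) × (List (String × String)) :=
  ("a", [("b", []), ("a", ["b"])], [("a", "1"), ("b", "2")], [([("b" : String), "a"], "3")], [])

def Spec_calculate_latency (node : String) (dependencies : List (String × List String)) (latency : List (String × String)) (shifts : List (List String × String)) (memo : List (String × String)) (out : String) : Prop := out = calculate_latency_alt node dependencies latency shifts memo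
instance (node : String) (dependencies : List (String × List String)) (latency : List (String × String)) (shifts : List (List String × String)) (memo : List (String × String)) (out : String) : Decidable (Spec_calculate_latency node dependencies latency shifts memo out) := by unfold Spec_calculate_latency; infer_instance

-- ===== CLAIM (what is proved, stated in full; the proofs are below) =====
def Claim_equal_calculate_latency : Prop := ∀ (node : String) (dependencies : List (String × List String)) (latency : List (String × String)) (shifts : List (List String × String)) (memo : List (String × String)), Dom_calculate_latency node dependencies latency shifts memo → Pre_calculate_latency node dependencies latency shifts memo → Spec_calculate_latency node dependencies latency shifts memo (calculate_latency node dependencies latency shifts memo)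

-- ===== LEMMAS AND PROOFS =====
-- canonV is the canonical memo value of a key at recursion depth n; InvC says every memo entry
-- is canonical; A's fuelled DFS (A_correct) and B's sweeps (passN_progress/rounds_get) both
-- return the canonical value of the queried node.

def canonStep (dep : PySem.Dict String (List String)) (lat : PySem.Dict String String)
    (sh : PySem.Dict (List String) String) (m0 : PySem.Dict String String)
    (c : String → Option String) (k : String) : Option String :=
  match m0.get? k with
  | some v => some v
  | none =>
    match dep.get? k, lat.get? k with
    | some ds, some lv =>
      if ds.isEmpty then some lv
      else if ds.all (fun d => (c d).isSome) then
        some ("max(" ++ PySem.Str.join ", " (ds.map (fun d =>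
          sh.getD [d, k] "0" ++ " + " ++ lv ++ ", " ++ (c d).getD "")) ++ ")")
      else none
    | _, _ => none

def canonV (dep : PySem.Dict String (List String)) (lat : PySem.Dict String String)
    (sh : PySem.Dict (List String) String) (m0 : PySem.Dict String String) :
    Nat → String → Option String
  | 0, k => m0.get? k
  | n + 1, k => canonStep dep lat sh m0 (canonV dep lat sh m0 n) k

def InvC (dep : PySem.Dict String (List String)) (lat : PySem.Dict String String)
    (sh : PySem.Dict (List String) String) (m0 m : PySem.Dict String String) : Prop :=
  ∀ x w, m.get? x = some w → ∃ j, canonV dep lat sh m0 j x = some w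

def SubD (m m' : PySem.Dict String String) : Prop :=
  ∀ x w, m.get? x = some w → m'.get? x = some w

theorem canonStep_mono (dep : PySem.Dict String (List String)) (lat : PySem.Dict String String)
    (sh : PySem.Dict (List String) String) (m0 : PySem.Dict String String)
    {c c' : String → Option String} (hcc : ∀ d w, c d = some w → c' d = some w) :
    ∀ k v, canonStep dep lat sh m0 c k = some v → canonStep dep lat sh m0 c' k = some v := by
  intro k v h
  unfold canonStep at h ⊢
  cases hm : m0.get? k with
  | some w => rw [hm] at h; exact h
  | none =>
    rw [hm] at h
    cases hd : dep.get? k with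
    | none => rw [hd] at h; cases h
    | some ds =>
      rw [hd] at h
      cases hl : lat.get? k with
      | none => rw [hl] at h; cases h
      | some lv =>
        rw [hl] at h
        by_cases he : ds.isEmpty
        · simp only [he, if_true] at h ⊢; exact h
        · simp only [he, Bool.false_eq_true, if_false] at h ⊢
          by_cases hall : ds.all (fun d => (c d).isSome) = true
          · have hall' : ds.all (fun d => (c' d).isSome) = true := by
              rw [List.all_eq_true] at hall ⊢
              intro d hd'
              obtain ⟨w, hw⟩ := Option.isSome_iff_exists.mp (by simpa using hall d hd')
              simp [hcc d w hw]
            rw [if_pos hall] at h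
            rw [if_pos hall', ← h]
            have hmap : ds.map (fun d => sh.getD [d, k] "0" ++ " + " ++ lv ++ ", " ++ (c' d).getD "")
                = ds.map (fun d => sh.getD [d, k] "0" ++ " + " ++ lv ++ ", " ++ (c d).getD "") := by
              apply List.map_congr_left
              intro d hd'
              obtain ⟨w, hw⟩ := Option.isSome_iff_exists.mp
                (by simpa using (List.all_eq_true.mp hall) d hd')
              rw [hw, hcc d w hw]
            rw [hmap]
          · rw [if_neg hall] at h; cases h

theorem canon_mono (dep : PySem.Dict String (List String)) (lat : PySem.Dict String String)
    (sh : PySem.Dict (List String) String) (m0 : PySem.Dict String String) :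
    ∀ n k v, canonV dep lat sh m0 n k = some v → canonV dep lat sh m0 (n + 1) k = some v := by
  intro n
  induction n with
  | zero =>
    intro k v h
    simp only [canonV] at h ⊢
    unfold canonStep
    rw [h]
  | succ n ih =>
    intro k v h
    simp only [canonV] at h ⊢
    exact canonStep_mono dep lat sh m0 (fun d w hw => ih d w hw) k v h

theorem canon_le (dep : PySem.Dict String (List String)) (lat : PySem.Dict String String)
    (sh : PySem.Dict (List String) String) (m0 : PySem.Dict String String) :
    ∀ n n' k v, n ≤ n' → canonV dep lat sh m0 n k = some v →
      canonV dep lat sh m0 n' k = some v := by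
  intro n n' k v hle h
  induction n', hle using Nat.le_induction with
  | base => exact h
  | succ n' _ ih => exact canon_mono dep lat sh m0 n' k v ih

theorem canon_fun (dep : PySem.Dict String (List String)) (lat : PySem.Dict String String)
    (sh : PySem.Dict (List String) String) (m0 : PySem.Dict String String)
    {n n' : Nat} {k v w : String} (h : canonV dep lat sh m0 n k = some v)
    (h' : canonV dep lat sh m0 n' k = some w) : v = w := by
  rcases le_total n n' with hle | hle
  · have := canon_le dep lat sh m0 n n' k v hle h
    rw [this] at h'; exact (Option.some_inj.mp h')
  · have := canon_le dep lat sh m0 n' n k w hle h'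
    rw [this] at h; exact (Option.some_inj.mp h).symm

theorem resolv_canon (dep : PySem.Dict String (List String)) (lat : PySem.Dict String String)
    (sh : PySem.Dict (List String) String) (m0 : PySem.Dict String String) :
    ∀ n k, resolvB dep lat m0 n k = true → ∃ v, canonV dep lat sh m0 n k = some v := by
  intro n
  induction n with
  | zero =>
    intro k h
    simp only [resolvB] at h
    simp only [canonV]
    exact Option.isSome_iff_exists.mp h
  | succ n ih =>
    intro k h
    simp only [resolvB, Bool.or_eq_true] at h
    rcases h with h | h
    · obtain ⟨v, hv⟩ := ih k h
      exact ⟨v, canon_mono dep lat sh m0 n k v hv⟩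
    · simp only [canonV]
      unfold canonStep
      cases hm : m0.get? k with
      | some v => exact ⟨v, rfl⟩
      | none =>
        cases hd : dep.get? k with
        | none => exact absurd h (by simp [hd])
        | some ds =>
          cases hl : lat.get? k with
          | none => exact absurd h (by simp [hd, hl])
          | some lv =>
            rw [hd, hl] at h
            replace h : ds.all (fun d => resolvB dep lat m0 n d) = true := h
            by_cases he : ds.isEmpty
            · exact ⟨lv, by simp [he]⟩
            · have hall : ds.all (fun d => (canonV dep lat sh m0 n d).isSome) = true := by
                rw [List.all_eq_true] at h ⊢
                intro d hd'
                obtain ⟨w, hw⟩ := ih d (by simpa using h d hd')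
                simp [hw]
              exact ⟨_, by simp only [he, Bool.false_eq_true, if_false, hall, if_pos]; rfl⟩

theorem stepB_mem {lat : PySem.Dict String String} {sh : PySem.Dict (List String) String}
    {m : PySem.Dict String String} {e : String × List String} {v : String}
    (hm : m.get? e.1 = some v) : stepB lat sh m e = m := by
  unfold stepB; rw [hm]

theorem stepB_nolat {lat : PySem.Dict String String} {sh : PySem.Dict (List String) String}
    {m : PySem.Dict String String} {e : String × List String}
    (hm : m.get? e.1 = none) (hl : lat.get? e.1 = none) : stepB lat sh m e = m := by
  unfold stepB; rw [hm, hl]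

theorem stepB_active {lat : PySem.Dict String String} {sh : PySem.Dict (List String) String}
    {m : PySem.Dict String String} {e : String × List String} {lv : String}
    (hm : m.get? e.1 = none) (hl : lat.get? e.1 = some lv) :
    stepB lat sh m e =
      if e.2.all (fun d => (m.get? d).isSome) then m.insert e.1 (valB sh e.1 e.2 lv m) else m := by
  unfold stepB; rw [hm, hl]

theorem step_mono (lat : PySem.Dict String String) (sh : PySem.Dict (List String) String)
    (m : PySem.Dict String String) (e : String × List String) {x : String} {w : String}
    (h : m.get? x = some w) : (stepB lat sh m e).get? x = some w := by
  cases hm : m.get? e.1 with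
  | some v => rw [stepB_mem hm]; exact h
  | none =>
    cases hl : lat.get? e.1 with
    | none => rw [stepB_nolat hm hl]; exact h
    | some lv =>
      rw [stepB_active hm hl]
      by_cases hall : e.2.all (fun d => (m.get? d).isSome) = true
      · rw [if_pos hall]
        have hx : x ≠ e.1 := by intro hh; rw [hh, hm] at h; cases h
        rw [PySem.Dict.get?_insert_of_ne _ _ hx]; exact h
      · rw [if_neg hall]; exact h

theorem fold_mono (lat : PySem.Dict String String) (sh : PySem.Dict (List String) String) :
    ∀ (l : List (String × List String)) (m : PySem.Dict String String) {x w : String},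
      m.get? x = some w → (l.foldl (stepB lat sh) m).get? x = some w := by
  intro l
  induction l with
  | nil => intro m x w h; simpa using h
  | cons e rest ih =>
    intro m x w h
    simp only [List.foldl_cons]
    exact ih _ (step_mono lat sh m e h)

-- a common canon fuel for finitely many memoised keys

theorem canon_maxfuel (dep : PySem.Dict String (List String)) (lat : PySem.Dict String String)
    (sh : PySem.Dict (List String) String) (m0 m : PySem.Dict String String)
    (hinv : InvC dep lat sh m0 m) :
    ∀ (ds : List String), (∀ d ∈ ds, (m.get? d).isSome = true) →
      ∃ J, ∀ d ∈ ds, canonV dep lat sh m0 J d = some ((m.get? d).getD "") := by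
  intro ds
  induction ds with
  | nil => intro _; exact ⟨0, by simp⟩
  | cons d rest ih =>
    intro h
    obtain ⟨J, hJ⟩ := ih (fun x hx => h x (List.mem_cons_of_mem _ hx))
    obtain ⟨w, hw⟩ := Option.isSome_iff_exists.mp (h d List.mem_cons_self)
    obtain ⟨j, hj⟩ := hinv d w hw
    refine ⟨max J j, ?_⟩
    intro x hx
    rcases List.mem_cons.mp hx with hx | hx
    · subst hx
      rw [hw]
      exact canon_le dep lat sh m0 j _ x w (le_max_right _ _) hj
    · exact canon_le dep lat sh m0 J _ x _ (le_max_left _ _) (hJ x hx)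

theorem step_inv (dep : PySem.Dict String (List String)) (lat : PySem.Dict String String)
    (sh : PySem.Dict (List String) String) (m0 m : PySem.Dict String String)
    (e : String × List String) (hdep : dep.get? e.1 = some e.2)
    (hinv : InvC dep lat sh m0 m) (hsub : SubD m0 m) :
    InvC dep lat sh m0 (stepB lat sh m e) := by
  cases hm : m.get? e.1 with
  | some v => rw [stepB_mem hm]; exact hinv
  | none =>
    cases hl : lat.get? e.1 with
    | none => rw [stepB_nolat hm hl]; exact hinv
    | some lv =>
      rw [stepB_active hm hl]
      by_cases hall : e.2.all (fun d => (m.get? d).isSome) = true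
      · rw [if_pos hall]
        obtain ⟨J, hJ⟩ := canon_maxfuel dep lat sh m0 m hinv e.2
          (fun d hd => by simpa using (List.all_eq_true.mp hall) d hd)
        have hm0 : m0.get? e.1 = none := by
          cases h0 : m0.get? e.1 with
          | none => rfl
          | some w => rw [hsub e.1 w h0] at hm; cases hm
        have hcan : canonV dep lat sh m0 (J + 1) e.1 = some (valB sh e.1 e.2 lv m) := by
          simp only [canonV]
          unfold canonStep
          rw [hm0, hdep, hl]
          unfold valB
          by_cases he : e.2.isEmpty
          · simp [he]
          · have hall' : e.2.all (fun d => (canonV dep lat sh m0 J d).isSome) = true := by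
              rw [List.all_eq_true]
              intro d hd
              rw [hJ d hd]; rfl
            simp only [he, Bool.false_eq_true, if_false, hall', if_pos]
            have hmap : e.2.map (fun d =>
                  sh.getD [d, e.1] "0" ++ " + " ++ lv ++ ", " ++ (canonV dep lat sh m0 J d).getD "")
                = e.2.map (fun d =>
                  sh.getD [d, e.1] "0" ++ " + " ++ lv ++ ", " ++ (m.get? d).getD "") :=
              List.map_congr_left (fun d hd => by rw [hJ d hd]; rfl)
            rw [hmap]
        intro x w hx
        by_cases hxe : x = e.1
        · subst hxe
          rw [PySem.Dict.get?_insert_self] at hx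
          exact ⟨J + 1, by rw [hcan, hx]⟩
        · rw [PySem.Dict.get?_insert_of_ne _ _ hxe] at hx
          exact hinv x w hx
      · rw [if_neg hall]; exact hinv

def passN (lat : PySem.Dict String String) (sh : PySem.Dict (List String) String)
    (deps : List (String × List String)) : Nat → PySem.Dict String String → PySem.Dict String String
  | 0, m => m
  | i + 1, m => passN lat sh deps i (deps.foldl (stepB lat sh) m)

theorem passN_succ_back (lat : PySem.Dict String String) (sh : PySem.Dict (List String) String)
    (deps : List (String × List String)) :
    ∀ i m, passN lat sh deps (i + 1) m = deps.foldl (stepB lat sh) (passN lat sh deps i m) := by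
  intro i
  induction i with
  | zero => intro m; rfl
  | succ i ih =>
    intro m
    show passN lat sh deps (i + 1) (deps.foldl (stepB lat sh) m) = _
    rw [ih]
    rfl

theorem passN_mono (lat : PySem.Dict String String) (sh : PySem.Dict (List String) String)
    (deps : List (String × List String)) :
    ∀ i (m : PySem.Dict String String) {x w : String},
      m.get? x = some w → (passN lat sh deps i m).get? x = some w := by
  intro i
  induction i with
  | zero => intro m x w h; exact h
  | succ i ih => intro m x w h; exact ih _ (fold_mono lat sh deps m h)

theorem fold_inv (dep : PySem.Dict String (List String)) (lat : PySem.Dict String String)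
    (sh : PySem.Dict (List String) String) (m0 : PySem.Dict String String) :
    ∀ (l : List (String × List String)) (m : PySem.Dict String String),
      (∀ e ∈ l, dep.get? e.1 = some e.2) →
      InvC dep lat sh m0 m → SubD m0 m →
      InvC dep lat sh m0 (l.foldl (stepB lat sh) m) := by
  intro l
  induction l with
  | nil => intro m _ hinv _; simpa using hinv
  | cons e rest ih =>
    intro m hmem hinv hsub
    simp only [List.foldl_cons]
    exact ih _ (fun e' he' => hmem e' (List.mem_cons_of_mem _ he'))
      (step_inv dep lat sh m0 m e (hmem e List.mem_cons_self) hinv hsub)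
      (fun x w h => step_mono lat sh m e (hsub x w h))

theorem passN_inv (dep : PySem.Dict String (List String)) (lat : PySem.Dict String String)
    (sh : PySem.Dict (List String) String) (m0 : PySem.Dict String String)
    (deps : List (String × List String)) (hmem : ∀ e ∈ deps, dep.get? e.1 = some e.2) :
    ∀ i, InvC dep lat sh m0 (passN lat sh deps i m0) ∧ SubD m0 (passN lat sh deps i m0) := by
  have h0 : InvC dep lat sh m0 m0 := fun x w h => ⟨0, h⟩
  intro i
  induction i with
  | zero => exact ⟨h0, fun x w h => h⟩
  | succ i ih =>
    rw [passN_succ_back]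
    exact ⟨fold_inv dep lat sh m0 deps _ hmem ih.1 ih.2,
      fun x w h => fold_mono lat sh deps _ (ih.2 x w h)⟩

theorem fold_hits (dep : PySem.Dict String (List String)) (lat : PySem.Dict String String)
    (sh : PySem.Dict (List String) String) (m0 : PySem.Dict String String)
    {k : String} {ds : List String} {lv v : String} {i : Nat}
    (hdk : dep.get? k = some ds) (hlk : lat.get? k = some lv)
    (hv : canonV dep lat sh m0 (i + 1) k = some v) (hm0k : m0.get? k = none) :
    ∀ (l : List (String × List String)) (m : PySem.Dict String String),
      (∀ e ∈ l, dep.get? e.1 = some e.2) →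
      (k, ds) ∈ l →
      InvC dep lat sh m0 m → SubD m0 m →
      (∀ d ∈ ds, m.get? d = some ((canonV dep lat sh m0 i d).getD "") ∧
        (canonV dep lat sh m0 i d).isSome = true) →
      (l.foldl (stepB lat sh) m).get? k = some v := by
  intro l
  induction l with
  | nil => intro m _ hk; simp at hk
  | cons e rest ih =>
    intro m hmem hk hinv hsub hds
    simp only [List.foldl_cons]
    by_cases hek : e.1 = k
    · have he2 : e.2 = ds := by
        have := hmem e List.mem_cons_self
        rw [hek, hdk] at this
        exact (Option.some_inj.mp this).symm
      cases hm : m.get? k with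
      | some w =>
        have hw : (rest.foldl (stepB lat sh) (stepB lat sh m e)).get? k = some w :=
          fold_mono lat sh rest _ (step_mono lat sh m e hm)
        obtain ⟨j, hj⟩ := hinv k w hm
        rw [hw, canon_fun dep lat sh m0 hj hv]
      | none =>
        have hact := stepB_active (sh := sh) (lv := lv) (by rw [hek]; exact hm) (by rw [hek, hlk])
        have hall : e.2.all (fun d => (m.get? d).isSome) = true := by
          rw [List.all_eq_true, he2]
          intro d hd
          simp [(hds d hd).1]
        rw [hact, if_pos hall]
        have hval : valB sh e.1 e.2 lv m = v := by
          simp only [canonV] at hv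
          unfold canonStep at hv
          rw [hm0k, hdk, hlk] at hv
          replace hv : (if ds.isEmpty = true then some lv
              else if (ds.all fun d => (canonV dep lat sh m0 i d).isSome) = true then
                some ("max(" ++ PySem.Str.join ", " (ds.map (fun d =>
                  sh.getD [d, k] "0" ++ " + " ++ lv ++ ", " ++
                    (canonV dep lat sh m0 i d).getD "")) ++ ")")
              else none) = some v := hv
          unfold valB
          rw [hek, he2]
          by_cases he : ds.isEmpty
          · rw [if_pos he] at hv ⊢
            exact Option.some_inj.mp hv
          · have hall' : ds.all (fun d => (canonV dep lat sh m0 i d).isSome) = true := by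
              rw [List.all_eq_true]; intro d hd; exact (hds d hd).2
            rw [if_neg he] at hv ⊢
            rw [if_pos hall'] at hv
            have hmap : ds.map (fun d =>
                  sh.getD [d, k] "0" ++ " + " ++ lv ++ ", " ++ (m.get? d).getD "")
                = ds.map (fun d =>
                  sh.getD [d, k] "0" ++ " + " ++ lv ++ ", " ++ (canonV dep lat sh m0 i d).getD "") :=
              List.map_congr_left (fun d hd => by rw [(hds d hd).1]; rfl)
            rw [hmap]
            exact Option.some_inj.mp hv
        rw [hval]
        exact fold_mono lat sh rest _ (by rw [hek]; exact PySem.Dict.get?_insert_self _ _ _)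
    · refine ih _ (fun e' he' => hmem e' (List.mem_cons_of_mem _ he')) ?_
        (step_inv dep lat sh m0 m e (hmem e List.mem_cons_self) hinv hsub)
        (fun x w h => step_mono lat sh m e (hsub x w h))
        (fun d hd => ⟨step_mono lat sh m e (hds d hd).1, (hds d hd).2⟩)
      rcases List.mem_cons.mp hk with h | h
      · exact absurd (congrArg Prod.fst h).symm hek
      · exact h

theorem passN_progress (dep : PySem.Dict String (List String)) (lat : PySem.Dict String String)
    (sh : PySem.Dict (List String) String) (m0 : PySem.Dict String String)
    (deps : List (String × List String)) (hmem : ∀ e ∈ deps, dep.get? e.1 = some e.2)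
    (hin : ∀ k ds, dep.get? k = some ds → (k, ds) ∈ deps) :
    ∀ i k v, canonV dep lat sh m0 i k = some v → (passN lat sh deps i m0).get? k = some v := by
  intro i
  induction i with
  | zero => intro k v h; exact h
  | succ i ih =>
    intro k v h
    rw [passN_succ_back]
    simp only [canonV] at h
    unfold canonStep at h
    cases hm0 : m0.get? k with
    | some w =>
      rw [hm0] at h
      replace h : some w = some v := h
      exact fold_mono lat sh deps _ (passN_mono lat sh deps i m0 (by rw [hm0, h]))
    | none =>
      rw [hm0] at h
      cases hdk : dep.get? k with
      | none => rw [hdk] at h; simp at h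
      | some ds =>
        rw [hdk] at h
        cases hlk : lat.get? k with
        | none => rw [hlk] at h; simp at h
        | some lv =>
          rw [hlk] at h
          replace h : (if ds.isEmpty = true then some lv
              else if (ds.all fun d => (canonV dep lat sh m0 i d).isSome) = true then
                some ("max(" ++ PySem.Str.join ", " (ds.map (fun d =>
                  sh.getD [d, k] "0" ++ " + " ++ lv ++ ", " ++
                    (canonV dep lat sh m0 i d).getD "")) ++ ")")
              else none) = some v := h
          have hds : ∀ d ∈ ds, (passN lat sh deps i m0).get? d
              = some ((canonV dep lat sh m0 i d).getD "") ∧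
              (canonV dep lat sh m0 i d).isSome = true := by
            by_cases he : ds.isEmpty
            · intro d hd
              rw [List.isEmpty_iff.mp he] at hd
              cases hd
            · rw [if_neg he] at h
              by_cases hall : (ds.all fun d => (canonV dep lat sh m0 i d).isSome) = true
              · intro d hd
                have hsd := (List.all_eq_true.mp hall) d hd
                obtain ⟨w, hw⟩ := Option.isSome_iff_exists.mp (by simpa using hsd)
                refine ⟨?_, by simpa using hsd⟩
                rw [hw]
                exact ih d w hw
              · rw [if_neg hall] at h; cases h
          have hv' : canonV dep lat sh m0 (i + 1) k = some v := by
            simp only [canonV]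
            unfold canonStep
            rw [hm0, hdk, hlk]
            exact h
          exact fold_hits dep lat sh m0 hdk hlk hv' hm0 deps _ hmem (hin k ds hdk)
            (passN_inv dep lat sh m0 deps hmem i).1 (passN_inv dep lat sh m0 deps hmem i).2 hds

theorem rounds_get (lat : PySem.Dict String String) (sh : PySem.Dict (List String) String)
    (deps : List (String × List String)) (node : String) {v : String} :
    ∀ i (m : PySem.Dict String String), (passN lat sh deps i m).get? node = some v →
      (roundsB lat sh deps node i m).get? node = some v := by
  intro i
  induction i with
  | zero => intro m h; exact h
  | succ i ih =>
    intro m h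
    simp only [roundsB]
    cases hm : m.get? node with
    | some w =>
      have := passN_mono lat sh deps (i + 1) m hm
      rw [h] at this
      simp only [Option.isSome_some, if_true]
      rw [hm, this]
    | none =>
      simp only [Option.isSome_none, Bool.false_eq_true, if_false]
      exact ih _ h

theorem mk_get?_mem {β : Type} :
    ∀ (l : List (String × β)) (k : String) (v : β),
      (PySem.Dict.mk l).get? k = some v → (k, v) ∈ l := by
  intro l
  induction l with
  | nil => intro k v h; simp [PySem.Dict.get?] at h
  | cons e rest ih =>
    intro k v h
    rw [show PySem.Dict.mk (e :: rest) = PySem.Dict.mk ((e.1, e.2) :: rest) by rfl,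
      PySem.Dict.get?_mk_cons] at h
    by_cases he : e.1 = k
    · simp only [he, beq_self_eq_true, if_true] at h
      rw [← he, ← Option.some_inj.mp h]
      exact List.mem_cons_self
    · rw [show (e.1 == k) = false by simp [he]] at h
      simp only [Bool.false_eq_true, if_false] at h
      exact List.mem_cons_of_mem _ (ih k v h)

theorem mem_mk_get? {β : Type} :
    ∀ (l : List (String × β)), (l.map Prod.fst).Nodup →
      ∀ e ∈ l, (PySem.Dict.mk l).get? e.1 = some e.2 := by
  intro l
  induction l with
  | nil => intro _ e he; simp at he
  | cons f rest ih =>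
    intro hnd e he
    simp only [List.map_cons, List.nodup_cons] at hnd
    rw [show PySem.Dict.mk (f :: rest) = PySem.Dict.mk ((f.1, f.2) :: rest) by rfl,
      PySem.Dict.get?_mk_cons]
    rcases List.mem_cons.mp he with h | h
    · rw [h]
      simp
    · have hne : (f.1 == e.1) = false := by
        simp only [beq_eq_false_iff_ne, ne_eq]
        intro hh
        exact hnd.1 (hh ▸ List.mem_map_of_mem h)
      rw [hne]
      simp only [Bool.false_eq_true, if_false]
      exact ih hnd.2 e h

theorem A_correct (dep : PySem.Dict String (List String)) (lat : PySem.Dict String String)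
    (sh : PySem.Dict (List String) String) (m0 : PySem.Dict String String) :
    ∀ (f : Nat) (n : Nat) (node : String) (m : PySem.Dict String String) (v : String),
      n < f → InvC dep lat sh m0 m → SubD m0 m →
      canonV dep lat sh m0 n node = some v →
      (calcLatA dep lat sh f node m).1 = v ∧
        InvC dep lat sh m0 (calcLatA dep lat sh f node m).2 ∧
        SubD m0 (calcLatA dep lat sh f node m).2 := by
  intro f
  induction f with
  | zero => intro n node m v hn; omega
  | succ f ih =>
    intro n node m v hn hinv hsub hc
    cases hmn : m.get? node with
    | some w =>
      have hred : calcLatA dep lat sh (f + 1) node m = (w, m) := by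
        simp only [calcLatA, hmn]
      rw [hred]
      obtain ⟨j, hj⟩ := hinv node w hmn
      exact ⟨canon_fun dep lat sh m0 hj hc, hinv, hsub⟩
    | none =>
      have hm0n : m0.get? node = none := by
        cases h0 : m0.get? node with
        | none => rfl
        | some w => rw [hsub node w h0] at hmn; cases hmn
      cases n with
      | zero => simp only [canonV, hm0n] at hc; exact absurd hc (by simp)
      | succ n =>
        simp only [canonV] at hc
        unfold canonStep at hc
        rw [hm0n] at hc
        cases hdn : dep.get? node with
        | none => rw [hdn] at hc; simp at hc
        | some ds =>
          rw [hdn] at hc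
          cases hln : lat.get? node with
          | none => rw [hln] at hc; simp at hc
          | some lv =>
            rw [hln] at hc
            replace hc : (if ds.isEmpty = true then some lv
                else if (ds.all fun d => (canonV dep lat sh m0 n d).isSome) = true then
                  some ("max(" ++ PySem.Str.join ", " (ds.map (fun d =>
                    sh.getD [d, node] "0" ++ " + " ++ lv ++ ", " ++
                      (canonV dep lat sh m0 n d).getD "")) ++ ")")
                else none) = some v := hc
            by_cases he : ds.isEmpty
            · rw [if_pos he] at hc
              replace hc : lv = v := Option.some_inj.mp hc
              have hred : calcLatA dep lat sh (f + 1) node m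
                  = ((lat.get? node).getD "", m.insert node ((lat.get? node).getD "")) := by
                simp only [calcLatA, hmn, hdn, he]
                rfl
              rw [hred, hln]
              refine ⟨hc, ?_, ?_⟩
              · intro x w hx
                by_cases hxn : x = node
                · subst hxn
                  rw [PySem.Dict.get?_insert_self] at hx
                  refine ⟨n + 1, ?_⟩
                  rw [← hx]
                  simp only [canonV]
                  unfold canonStep
                  rw [hm0n, hdn, hln]
                  simp [he]
                · rw [PySem.Dict.get?_insert_of_ne _ _ hxn] at hx
                  exact hinv x w hx
              · intro x w hx
                have hxn : x ≠ node := by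
                  intro hh
                  rw [hh] at hx
                  rw [hsub node w hx] at hmn
                  cases hmn
                rw [PySem.Dict.get?_insert_of_ne _ _ hxn]
                exact hsub x w hx
            · rw [if_neg he] at hc
              by_cases hall : (ds.all fun d => (canonV dep lat sh m0 n d).isSome) = true
              swap
              · rw [if_neg hall] at hc; cases hc
              rw [if_pos hall] at hc
              have hnf : n < f := by omega
              have loop : ∀ (ds' : List String), (∀ d ∈ ds', (canonV dep lat sh m0 n d).isSome = true) →
                  ∀ (parts : List String) (m' : PySem.Dict String String),
                  InvC dep lat sh m0 m' → SubD m0 m' →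
                  (ds'.foldl
                    (fun (st : List String × PySem.Dict String String) d =>
                      let p := calcLatA dep lat sh f d st.2
                      (st.1 ++ [sh.getD [d, node] "0" ++ " + " ++ (lat.get? node).getD "" ++ ", " ++ p.1],
                       p.2))
                    (parts, m')).1
                    = parts ++ ds'.map (fun d => sh.getD [d, node] "0" ++ " + " ++
                        (lat.get? node).getD "" ++ ", " ++ (canonV dep lat sh m0 n d).getD "") ∧
                  InvC dep lat sh m0 (ds'.foldl
                    (fun (st : List String × PySem.Dict String String) d =>
                      let p := calcLatA dep lat sh f d st.2
                      (st.1 ++ [sh.getD [d, node] "0" ++ " + " ++ (lat.get? node).getD "" ++ ", " ++ p.1],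
                       p.2))
                    (parts, m')).2 ∧
                  SubD m0 (ds'.foldl
                    (fun (st : List String × PySem.Dict String String) d =>
                      let p := calcLatA dep lat sh f d st.2
                      (st.1 ++ [sh.getD [d, node] "0" ++ " + " ++ (lat.get? node).getD "" ++ ", " ++ p.1],
                       p.2))
                    (parts, m')).2 := by
                intro ds'
                induction ds' with
                | nil => intro _ parts m' hc' hs'; exact ⟨by simp, hc', hs'⟩
                | cons d rest ihd =>
                  intro hfuel parts m' hc' hs'
                  obtain ⟨w, hw⟩ := Option.isSome_iff_exists.mp (hfuel d List.mem_cons_self)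
                  obtain ⟨hv1, hv2, hv3⟩ := ih n d m' w hnf hc' hs' hw
                  simp only [List.foldl_cons]
                  obtain ⟨hr1, hr2, hr3⟩ := ihd (fun x hx => hfuel x (List.mem_cons_of_mem _ hx))
                    (parts ++ [sh.getD [d, node] "0" ++ " + " ++ (lat.get? node).getD "" ++ ", " ++
                      (calcLatA dep lat sh f d m').1])
                    (calcLatA dep lat sh f d m').2 hv2 hv3
                  refine ⟨?_, hr2, hr3⟩
                  rw [hr1, hv1]
                  simp [hw]
              obtain ⟨hl1, hl2, hl3⟩ := loop ds (fun d hd => (List.all_eq_true.mp hall) d hd)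
                [] m hinv hsub
              have hdsne : ds ≠ [] := fun h => by rw [h] at he; simp at he
              have hparts_ne : (ds.map (fun d => sh.getD [d, node] "0" ++ " + " ++
                  (lat.get? node).getD "" ++ ", " ++
                  (canonV dep lat sh m0 n d).getD "")).isEmpty = false := by
                simp [hdsne]
              have hred : calcLatA dep lat sh (f + 1) node m
                  = (let st := ds.foldl
                      (fun (st : List String × PySem.Dict String String) d =>
                        let p := calcLatA dep lat sh f d st.2
                        (st.1 ++ [sh.getD [d, node] "0" ++ " + " ++ (lat.get? node).getD "" ++ ", " ++ p.1],
                         p.2))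
                      ([], m)
                     let r := if st.1.isEmpty then (lat.get? node).getD ""
                              else "max(" ++ PySem.Str.join ", " st.1 ++ ")"
                     (r, st.2.insert node r)) := by
                simp only [calcLatA, hmn, hdn, he, Bool.false_eq_true, if_false]
              rw [hred]
              simp only [hl1, List.nil_append, hparts_ne, Bool.false_eq_true, if_false]
              have hstr : "max(" ++ PySem.Str.join ", " (ds.map (fun d =>
                  sh.getD [d, node] "0" ++ " + " ++ (lat.get? node).getD "" ++ ", " ++
                  (canonV dep lat sh m0 n d).getD "")) ++ ")" = v := by
                rw [hln]
                exact Option.some_inj.mp hc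
              refine ⟨hstr, ?_, ?_⟩
              · intro x w hx
                by_cases hxn : x = node
                · subst hxn
                  rw [PySem.Dict.get?_insert_self] at hx
                  refine ⟨n + 1, ?_⟩
                  rw [← hx, hstr]
                  simp only [canonV]
                  unfold canonStep
                  rw [hm0n, hdn, hln]
                  simpa [he, hall] using hc
                · rw [PySem.Dict.get?_insert_of_ne _ _ hxn] at hx
                  exact hl2 x w hx
              · intro x w hx
                have hxn : x ≠ node := by
                  intro hh
                  rw [hh] at hx
                  rw [hsub node w hx] at hmn
                  cases hmn
                rw [PySem.Dict.get?_insert_of_ne _ _ hxn]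
                exact hl3 x w hx

-- ===== VERDICT (by name: the statement is the Claim_ definition above) =====
theorem calculate_latency_spec : Claim_equal_calculate_latency := by
  intro node dependencies latency shifts memo _ hpre
  unfold Spec_calculate_latency
  obtain ⟨hnd, hres⟩ := hpre
  obtain ⟨v, hv⟩ := resolv_canon (PySem.Dict.mk dependencies) (PySem.Dict.mk latency)
    (PySem.Dict.mk shifts) (PySem.Dict.mk memo) dependencies.length node hres
  have hA := A_correct (PySem.Dict.mk dependencies) (PySem.Dict.mk latency)
    (PySem.Dict.mk shifts) (PySem.Dict.mk memo) (dependencies.length + 1) dependencies.length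
    node (PySem.Dict.mk memo) v (by omega) (fun x w h => ⟨0, h⟩) (fun x w h => h) hv
  unfold calculate_latency calculate_latency_alt
  rw [hA.1]
  cases hmn : (PySem.Dict.mk memo).get? node with
  | some w =>
    have h0 : canonV (PySem.Dict.mk dependencies) (PySem.Dict.mk latency)
        (PySem.Dict.mk shifts) (PySem.Dict.mk memo) 0 node = some w := hmn
    simp only [hmn]
    exact canon_fun _ _ _ _ hv h0
  | none =>
    simp only [hmn]
    have hmem := mem_mk_get? dependencies hnd
    have hin := fun k ds h => mk_get?_mem dependencies k ds h
    have hprog := passN_progress (PySem.Dict.mk dependencies) (PySem.Dict.mk latency)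
      (PySem.Dict.mk shifts) (PySem.Dict.mk memo) dependencies hmem hin
      dependencies.length node v hv
    have hr := rounds_get (PySem.Dict.mk latency) (PySem.Dict.mk shifts) dependencies node
      dependencies.length (PySem.Dict.mk memo) hprog
    rw [hr]
    rfl
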